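-- pv_equiv track=rewrite | github.com/MrBrantCode/unitest_baseline | mut_generate/mist_train_taco/taco_19099/solution.py | largest_carbon_compound
-- ===== SOURCE A (Python) =====
-- def largest_carbon_compound(n: int) -> int:
--     """
--     Calculate the number of carbons of the largest possible carbon compound
--     whose longest carbon chain has n carbons.
--
--     Parameters:
--     n (int): The length of the longest carbon chain (1 ≤ n ≤ 30).
--
--     Returns:
--     int: The number of carbons of the largest possible carbon compound.
--     """
--     if n < 1 or n > 30:
--         raise ValueError("The length of the carbon chain must be between 1 and 30.")
--
--     a = [0] * 32
--     a[1], a[2] = 1, 2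
--
--     for i in range(3, 31):
--         a[i] = 3 * a[i - 2] + 2
--
--     return a[n]
-- ===== SOURCE B (Python) =====
-- def largest_carbon_compound(n: int) -> int:
--     if n < 1 or n > 30:
--         raise ValueError("The length of the carbon chain must be between 1 and 30.")
--     # closed form: a[n] + 1 = 3 * (a[n-2] + 1), so a[n] = 3**(n//2) - 1 for even n,
--     # and 2 * 3**((n-1)//2) - 1 for odd n.
--     if n % 2 == 0:
--         return 3 ** (n // 2) - 1
--     return 2 * 3 ** ((n - 1) // 2) - 1
-- ===== Notes on version B (the rewrite author's own statement) =====
-- stated objective: simpler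
-- what changed: replaces the 32-cell DP array and loop with a closed-form power of 3 (even n: 3**(n//2)-1, odd n: 2*3**((n-1)//2)-1), keeping the same range guard
import Mathlib
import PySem

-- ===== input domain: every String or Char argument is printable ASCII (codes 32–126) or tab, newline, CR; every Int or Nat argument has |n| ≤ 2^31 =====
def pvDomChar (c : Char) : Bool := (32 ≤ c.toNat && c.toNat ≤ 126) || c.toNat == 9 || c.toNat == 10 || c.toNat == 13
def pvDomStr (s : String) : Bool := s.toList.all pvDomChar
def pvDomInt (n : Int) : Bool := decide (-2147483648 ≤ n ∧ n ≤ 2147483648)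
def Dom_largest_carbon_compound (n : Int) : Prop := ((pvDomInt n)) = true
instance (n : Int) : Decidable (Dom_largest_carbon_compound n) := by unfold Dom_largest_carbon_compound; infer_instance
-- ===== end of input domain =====

-- ===== PORT A =====
-- B replaces A's 32-cell DP array and loop with a closed-form power of 3 (same value on 1..30;
-- A raises ValueError outside 1..30, excluded by Pre_).
-- a[n] on the raise branch / out-of-range read has no Python value; Pre_ excludes it, .getD 0 there.
def largest_carbon_compound (n : Int) : Int :=
  if n < 1 ∨ n > 30 then 0   -- Python: raise ValueError (outside Pre_)
  else
    let a : List Int := (List.replicate 32 (0 : Int)).set 1 1 |>.set 2 2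
    let a := (PySem.List.pyRange 3 31 1).foldl
      (fun a i => a.set i.toNat (3 * ((PySem.List.pyGet? a (i - 2)).getD 0) + 2)) a
    (PySem.List.pyGet? a n).getD 0

-- ===== PORT B =====
def largest_carbon_compound_alt (n : Int) : Int :=
  if n < 1 ∨ n > 30 then 0   -- Python: raise ValueError (outside Pre_)
  else if PySem.Int.mod n 2 = 0 then 3 ^ (PySem.Int.floordiv n 2).toNat - 1
  else 2 * 3 ^ (PySem.Int.floordiv (n - 1) 2).toNat - 1

-- ===== PRECONDITION & SPEC =====
-- Pre_ excludes exactly the inputs where A raises ValueError (n < 1 or n > 30).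
def Pre_largest_carbon_compound (n : Int) : Prop := 1 ≤ n ∧ n ≤ 30
instance (n : Int) : Decidable (Pre_largest_carbon_compound n) := by unfold Pre_largest_carbon_compound; infer_instance
def pvWitness_largest_carbon_compound : Int := 5
def Spec_largest_carbon_compound (n : Int) (out : Int) : Prop := out = largest_carbon_compound_alt n
instance (n : Int) (out : Int) : Decidable (Spec_largest_carbon_compound n out) := by unfold Spec_largest_carbon_compound; infer_instance

-- ===== CLAIM (what is proved, stated in full; the proofs are below) =====
def Claim_equal_largest_carbon_compound : Prop := ∀ (n : Int), Dom_largest_carbon_compound n → Pre_largest_carbon_compound n → Spec_largest_carbon_compound n (largest_carbon_compound n)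

-- ===== LEMMAS AND PROOFS =====

-- ===== VERDICT (by name: the statement is the Claim_ definition above) =====
theorem largest_carbon_compound_spec : Claim_equal_largest_carbon_compound := by
  intro n _ hpre
  unfold Spec_largest_carbon_compound
  obtain ⟨h1, h2⟩ := hpre
  interval_cases n <;> decide
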